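-- pv_equiv track=rewrite | github.com/seungh0/programmers-algorithm | 202107/20210709/1181.py | solution
-- ===== SOURCE A (Python) =====
-- from collections import defaultdict
--
-- def solution(n, words):
--     dict = defaultdict(int)
--     for word in words:
--         dict[word] = len(word)
--
--     arr = []
--     for key, value in dict.items():
--         arr.append((key, value))
--
--     arr.sort(key=lambda x: (x[1], x[0]))
--     return [key for key, value in arr]
-- ===== SOURCE B (Python) =====
-- from collections import defaultdict
--
-- def solution(n, words):
--     buckets = defaultdict(list)
--     for w in words:
--         buckets[len(w)].append(w)
--     out = []
--     for length in sorted(buckets):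
--         out.extend(sorted(set(buckets[length])))
--     return out
-- ===== Notes on version B (the rewrite author's own statement) =====
-- stated objective: alternative
-- what changed: B groups the words into a dict of per-length buckets in one pass, then walks the lengths in sorted order emitting each bucket's distinct words alphabetically, instead of A's dedup-dict followed by a single sort with the tuple key (len, word).
import Mathlib
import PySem

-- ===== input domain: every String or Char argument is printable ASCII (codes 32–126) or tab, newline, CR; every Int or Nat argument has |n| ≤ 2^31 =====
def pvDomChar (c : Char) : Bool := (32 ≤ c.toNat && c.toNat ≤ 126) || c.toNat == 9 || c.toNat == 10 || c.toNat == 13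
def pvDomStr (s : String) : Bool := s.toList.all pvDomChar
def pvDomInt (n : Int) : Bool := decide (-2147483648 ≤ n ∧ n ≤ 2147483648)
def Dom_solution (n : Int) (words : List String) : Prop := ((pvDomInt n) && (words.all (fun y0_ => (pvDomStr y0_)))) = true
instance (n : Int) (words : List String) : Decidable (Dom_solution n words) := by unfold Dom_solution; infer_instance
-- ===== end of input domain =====

-- B replaces A's single tuple-key sort of a dedup dict by a group-by-length bucketing pass
-- followed by sorting each bucket alphabetically (objective: alternative decomposition, same cost).

-- ===== PORT A =====
def solution (n : Int) (words : List String) : List String :=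
  -- dict = defaultdict(int); for word in words: dict[word] = len(word)
  let d : PySem.Dict String Int :=
    words.foldl (fun d word => d.insert word (PySem.Str.len word)) PySem.Dict.empty
  -- arr = []; for key, value in dict.items(): arr.append((key, value))
  let arr : List (String × Int) := d.items.foldl (fun acc kv => acc ++ [kv]) []
  -- arr.sort(key=lambda x: (x[1], x[0]))
  let sortedArr := PySem.List.sorted2 arr (fun x => x.2) (fun x => x.1)
  -- return [key for key, value in arr]
  sortedArr.map (fun x => x.1)

-- ===== PORT B =====
def solution_alt (n : Int) (words : List String) : List String :=
  -- buckets = defaultdict(list); for w in words: buckets[len(w)].append(w)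
  let buckets : PySem.Dict Int (List String) :=
    words.foldl (fun d w => d.modify (PySem.Str.len w) [] (fun b => b ++ [w])) PySem.Dict.empty
  -- out = []; for length in sorted(buckets): out.extend(sorted(set(buckets[length])))
  (PySem.List.sorted buckets.keys (fun x => x)).foldl
    (fun out length =>
      out ++ PySem.List.sorted (PySem.Set.ofList (buckets.getD length [])) (fun x => x)) []

-- ===== PRECONDITION & SPEC =====
def Spec_solution (n : Int) (words : List String) (out : List String) : Prop := out = solution_alt n words
instance (n : Int) (words : List String) (out : List String) : Decidable (Spec_solution n words out) := by unfold Spec_solution; infer_instance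

-- ===== CLAIM (what is proved, stated in full; the proofs are below) =====
def Claim_equal_solution : Prop := ∀ (n : Int) (words : List String), Dom_solution n words → Spec_solution n words (solution n words)

-- ===== LEMMAS AND PROOFS =====

-- A's sort with tuple key (x[1], x[0]) is the sort by the lexicographic key toLex (x.2, x.1).
lemma sorted2_eq_sorted_toLex (xs : List (String × Int)) :
    PySem.List.sorted2 xs (fun x => x.2) (fun x => x.1)
      = PySem.List.sorted xs (fun x => toLex (x.2, x.1)) := by
  have hcmp : (fun (a b : String × Int) =>
        decide (a.2 < b.2) || (!decide (b.2 < a.2) && decide (a.1 < b.1)))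
      = (fun (a b : String × Int) => decide (toLex (a.2, a.1) < toLex (b.2, b.1))) := by
    funext a b
    simp only [Prod.Lex.toLex_lt_toLex]
    rcases lt_trichotomy a.2 b.2 with h | h | h
    · simp [h]
    · simp [h]
    · simp [h, lt_asymm h, ne_of_gt h]
  rw [PySem.List.sorted_eq_foldl_insertBy]
  unfold PySem.List.sorted2
  show List.foldl (fun acc x => PySem.List.insertBy
      (fun (a b : String × Int) =>
        decide (a.2 < b.2) || (!decide (b.2 < a.2) && decide (a.1 < b.1))) x acc) [] xs
    = List.foldl (fun acc x => PySem.List.insertBy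
      (fun a b => decide (toLex (a.2, a.1) < toLex (b.2, b.1))) x acc) [] xs
  rw [hcmp]

-- The value stored by A's first loop at any present key is the key's length.
lemma get?_foldl_insert_len (l : List String) (d : PySem.Dict String Int) (k : String) :
    (l.foldl (fun d w => d.insert w (PySem.Str.len w)) d).get? k
      = if k ∈ l then some (PySem.Str.len k) else d.get? k := by
  induction l generalizing d with
  | nil => simp
  | cons x xs ih =>
    simp only [List.foldl_cons, ih]
    by_cases hk : k ∈ xs
    · simp [hk]
    · by_cases hx : k = x
      · subst hx; simp [hk, PySem.Dict.get?_insert_self]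
      · simp [hk, hx, PySem.Dict.get?_insert_of_ne _ _ hx]

-- A's dict lists each distinct word once, paired with its length.
lemma itemsA (words : List String) :
    (words.foldl (fun d word => d.insert word (PySem.Str.len word))
        (PySem.Dict.empty : PySem.Dict String Int)).items
      = (PySem.Set.ofList words).map (fun w => (w, PySem.Str.len w)) := by
  have hkeys : (words.foldl (fun d word => d.insert word (PySem.Str.len word))
      (PySem.Dict.empty : PySem.Dict String Int)).keys = PySem.Set.ofList words := by
    have := PySem.Dict.keys_foldl_insert_key (l := words) (key := fun w => w)
      (f := fun _ w => PySem.Str.len w) (d := (PySem.Dict.empty : PySem.Dict String Int))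
    simpa [PySem.Dict.keys_empty, PySem.Set.update_nil_left, List.map_id'] using this
  rw [PySem.Dict.items_eq_map_keys _ (by rw [hkeys]; exact PySem.Set.nodup_ofList words) 0, hkeys]
  apply List.map_congr_left
  intro w hw
  have hwmem : w ∈ words := (PySem.Set.mem_ofList words w).1 hw
  rw [PySem.Dict.getD_eq_get?_getD, get?_foldl_insert_len, if_pos hwmem]
  rfl

-- B's bucket for a length L holds exactly the words of length L, in order (with repeats).
lemma bucketB (words : List String) (L : Int) :
    (words.foldl (fun d w => d.modify (PySem.Str.len w) [] (fun b => b ++ [w]))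
        (PySem.Dict.empty : PySem.Dict Int (List String))).getD L []
      = words.filter (fun w => PySem.Str.len w == L) := by
  have hmap : words.foldl (fun d w => d.modify (PySem.Str.len w) [] (fun b => b ++ [w]))
        (PySem.Dict.empty : PySem.Dict Int (List String))
      = (words.map (fun w => (PySem.Str.len w, w))).foldl
          (fun d p => d.modify p.1 [] (fun b => b ++ [p.2])) PySem.Dict.empty := by
    rw [List.foldl_map]
  rw [hmap, PySem.Dict.getD_foldl_modify_append]
  simp [List.filter_map, Function.comp_def]

-- B's bucket keys are the distinct lengths.
lemma keysB (words : List String) :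
    (words.foldl (fun d w => d.modify (PySem.Str.len w) [] (fun b => b ++ [w]))
        (PySem.Dict.empty : PySem.Dict Int (List String))).keys
      = PySem.Set.ofList (words.map (fun w => PySem.Str.len w)) := by
  have := PySem.Dict.keys_foldl_modify_key (l := words) (key := fun w => PySem.Str.len w)
    (d0 := ([] : List String)) (f := fun _ w => fun b => b ++ [w])
    (d := (PySem.Dict.empty : PySem.Dict Int (List String)))
  simpa [PySem.Dict.keys_empty, PySem.Set.update_nil_left] using this

-- B's result, written as a flatMap over the sorted distinct lengths.
def pvR (words : List String) : List String :=
  (PySem.List.sorted (PySem.Set.ofList (words.map (fun w => PySem.Str.len w))) (fun x => x)).flatMap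
    (fun L => PySem.List.sorted
      (PySem.Set.ofList (words.filter (fun w => PySem.Str.len w == L))) (fun x => x))

lemma solution_alt_eq_pvR (n : Int) (words : List String) :
    solution_alt n words = pvR words := by
  simp only [solution_alt, keysB, bucketB, pvR]
  rw [PySem.List.foldl_append_eq_flatMap]
  simp

lemma mem_pvR (words : List String) (x : String) : x ∈ pvR words ↔ x ∈ words := by
  simp only [pvR, List.mem_flatMap, PySem.List.mem_sorted, PySem.Set.mem_ofList,
    List.mem_filter, List.mem_map, beq_iff_eq]
  constructor
  · rintro ⟨L, -, hx, -⟩; exact hx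
  · intro hx; exact ⟨PySem.Str.len x, ⟨x, hx, rfl⟩, hx, rfl⟩

lemma nodup_pvR (words : List String) : (pvR words).Nodup := by
  rw [pvR, List.nodup_flatMap]
  constructor
  · intro L _
    exact ((PySem.List.sorted_perm _ _ _).nodup_iff).2 (PySem.Set.nodup_ofList _)
  · have hpw := PySem.List.sorted_ofList_pairwise_lt (words.map (fun w => PySem.Str.len w))
    refine hpw.imp ?_
    intro L L' hLL' x hx hx'
    simp only [PySem.List.mem_sorted, PySem.Set.mem_ofList, List.mem_filter, beq_iff_eq] at hx hx'
    exact absurd (hx.2.symm.trans hx'.2) (ne_of_lt hLL')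

lemma pairwise_pvR (words : List String) :
    (pvR words).Pairwise
      (fun a b => toLex (PySem.Str.len a, a) < toLex (PySem.Str.len b, b)) := by
  rw [pvR, List.pairwise_flatMap]
  constructor
  · intro L _
    have hpw := PySem.List.sorted_ofList_pairwise_lt
      (words.filter (fun w => PySem.Str.len w == L))
    refine List.Pairwise.imp_of_mem ?_ hpw
    intro a b ha hb hab
    simp only [PySem.List.mem_sorted, PySem.Set.mem_ofList, List.mem_filter,
      beq_iff_eq] at ha hb
    rw [Prod.Lex.toLex_lt_toLex]
    exact Or.inr ⟨ha.2.trans hb.2.symm, hab⟩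
  · have hpw := PySem.List.sorted_ofList_pairwise_lt (words.map (fun w => PySem.Str.len w))
    refine hpw.imp ?_
    intro L L' hLL' x hx y hy
    simp only [PySem.List.mem_sorted, PySem.Set.mem_ofList, List.mem_filter,
      beq_iff_eq] at hx hy
    rw [Prod.Lex.toLex_lt_toLex]
    exact Or.inl (by rw [hx.2, hy.2]; exact hLL')

lemma pvR_perm_ofList (words : List String) : (pvR words).Perm (PySem.Set.ofList words) := by
  rw [List.perm_ext_iff_of_nodup (nodup_pvR words) (PySem.Set.nodup_ofList words)]
  intro a
  rw [mem_pvR, PySem.Set.mem_ofList]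

-- ===== VERDICT (by name: the statement is the Claim_ definition above) =====
theorem solution_spec : Claim_equal_solution := by
  intro n words _
  unfold Spec_solution
  rw [solution_alt_eq_pvR]
  simp only [solution, itemsA, PySem.List.foldl_append_singleton_eq_self, List.nil_append]
  rw [sorted2_eq_sorted_toLex]
  have hsorted :
      PySem.List.sorted ((PySem.Set.ofList words).map (fun w => (w, PySem.Str.len w)))
        (fun x => toLex (x.2, x.1))
      = (pvR words).map (fun w => (w, PySem.Str.len w)) := by
    apply PySem.List.sorted_eq_of_perm_of_pairwise_lt
    · exact (pvR_perm_ofList words).map _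
    · rw [List.pairwise_map]
      exact pairwise_pvR words
  rw [hsorted, List.map_map]
  simp [Function.comp_def]
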